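-- pv_equiv track=rewrite | github.com/weiyuyan/LeetCode | 剑指offer/面试题5.替换空格.py | replaceSpaces
-- ===== SOURCE A (Python) =====
-- def replaceSpaces(s):
--     """
--     :type s: str
--     :rtype: str
--     """
--     res = ''
--     for char in s:
--         if char == ' ':
--             res += '%20'
--         else:
--             res += char
--     return res
-- ===== SOURCE B (Python) =====
-- def replaceSpaces(s):
--     """
--     :type s: str
--     :rtype: str
--     """
--     return '%20'.join(s.split(' '))
-- ===== Notes on version B (the rewrite author's own statement) =====
-- stated objective: faster
-- what changed: Replaces the character-by-character string-accumulation loop with a two-phase tokenize-then-join: split the string on the space delimiter (empty fragments preserved, one per space) and rejoin the fragments with the replacement separator.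
import Mathlib
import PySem

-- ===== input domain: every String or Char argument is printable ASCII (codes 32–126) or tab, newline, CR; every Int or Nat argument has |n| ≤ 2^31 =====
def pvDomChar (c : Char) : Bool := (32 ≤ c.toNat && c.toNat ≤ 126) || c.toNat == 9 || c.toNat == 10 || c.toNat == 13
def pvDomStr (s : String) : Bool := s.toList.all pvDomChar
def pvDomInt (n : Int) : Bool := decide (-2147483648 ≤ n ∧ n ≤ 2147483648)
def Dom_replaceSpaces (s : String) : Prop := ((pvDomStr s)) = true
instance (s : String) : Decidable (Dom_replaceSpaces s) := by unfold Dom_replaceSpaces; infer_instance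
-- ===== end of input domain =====

-- B replaces A's character-by-character accumulation loop with the idiomatic split-then-join
-- strategy; same O(n) asymptotics, measurably faster by constant factor (C-level split/join).


-- ===== PORT A =====
-- res = ''; for char in s: res += '%20' if char == ' ' else char; return res
def replaceSpaces (s : String) : String :=
  String.mk (s.toList.foldl (fun res c => res ++ (if c == ' ' then "%20".toList else [c])) [])

-- ===== PORT B =====
-- return '%20'.join(s.split(' '))  — s.split(' ') is Chars.splitOn (sep ≠ ""), join is Chars.join
def replaceSpaces_alt (s : String) : String :=
  String.mk (PySem.Chars.join "%20".toList (PySem.Chars.splitOn s.toList " ".toList))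

-- ===== PRECONDITION & SPEC =====
def Spec_replaceSpaces (s : String) (out : String) : Prop := out = replaceSpaces_alt s
instance (s : String) (out : String) : Decidable (Spec_replaceSpaces s out) := by unfold Spec_replaceSpaces; infer_instance

-- ===== CLAIM (what is proved, stated in full; the proofs are below) =====
def Claim_equal_replaceSpaces : Prop := ∀ (s : String), Dom_replaceSpaces s → Spec_replaceSpaces s (replaceSpaces s)

-- ===== LEMMAS AND PROOFS =====

/-- Pure recursive model of splitting on a single space with a pending chunk `cur`. -/
def splitSp : List Char → List Char → List (List Char)
  | [], cur => [cur.reverse]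
  | c :: rest, cur => if c == ' ' then cur.reverse :: splitSp rest [] else splitSp rest (c :: cur)

theorem splitSp_ne_nil (l cur : List Char) : splitSp l cur ≠ [] := by
  induction l generalizing cur with
  | nil => simp [splitSp]
  | cons c rest ih => simp only [splitSp]; split_ifs <;> simp [ih]

theorem go_eq_splitSp (fuel : Nat) (l cur : List Char) (acc : List (List Char)) (h : l.length ≤ fuel) :
    PySem.Chars.splitOn.go [' '] fuel l cur acc = acc.reverse ++ splitSp l cur := by
  induction fuel generalizing l cur acc with
  | zero =>
    have : l = [] := by cases l <;> simp_all
    subst this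
    simp [PySem.Chars.splitOn.go, splitSp]
  | succ fuel ih =>
    cases l with
    | nil => simp [PySem.Chars.splitOn.go, splitSp]
    | cons c rest =>
      by_cases hc : c = ' '
      · subst hc
        have hpre : [' '].isPrefixOf (' ' :: rest) = true := by simp [List.isPrefixOf]
        simp only [PySem.Chars.splitOn.go, hpre, if_true, List.length_cons] at *
        rw [show List.drop ([].length + 1) (' ' :: rest) = rest from rfl,
            ih rest [] (cur.reverse :: acc) (by omega)]
        simp [splitSp]
      · have hpre : [' '].isPrefixOf (c :: rest) = false := by
          simp [List.isPrefixOf]; exact fun h => absurd h.symm hc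
        simp only [PySem.Chars.splitOn.go, hpre] at *
        rw [if_neg (by simp [hc]), ih rest (c :: cur) acc (by simpa using Nat.le_of_succ_le_succ (by simpa using h))]
        simp [splitSp, hc]

theorem intercalate_cons_of_ne_nil {α : Type} (sep x : List α) (xs : List (List α)) (h : xs ≠ []) :
    List.intercalate sep (x :: xs) = x ++ sep ++ List.intercalate sep xs := by
  cases xs with
  | nil => exact absurd rfl h
  | cons y ys => simp [List.intercalate, List.intersperse, List.append_assoc]

theorem join_splitSp (l cur : List Char) :
    PySem.Chars.join "%20".toList (splitSp l cur)
      = cur.reverse ++ l.flatMap (fun c => if c == ' ' then "%20".toList else [c]) := by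
  induction l generalizing cur with
  | nil => simp [splitSp, PySem.Chars.join, List.intercalate]
  | cons c rest ih =>
    by_cases hc : c = ' '
    · subst hc
      simp only [splitSp, PySem.Chars.join] at *
      rw [if_pos (by simp), intercalate_cons_of_ne_nil _ _ _ (splitSp_ne_nil rest [])]
      simp only [List.flatMap_cons, if_pos (by rfl : ((' ' == ' ') = true))]
      rw [show (splitSp rest [] : List (List Char)) = splitSp rest ([].reverse ++ []) from rfl]
      have := ih []
      simp only [List.reverse_nil, List.nil_append] at this
      simp [List.append_assoc]
      simpa using this
    · simp only [splitSp]
      rw [if_neg (by simp [hc]), ih (c :: cur)]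
      simp [List.flatMap_cons, hc, List.append_assoc]

-- ===== VERDICT (by name: the statement is the Claim_ definition above) =====
theorem replaceSpaces_spec : Claim_equal_replaceSpaces := by
  intro s _
  unfold Spec_replaceSpaces replaceSpaces replaceSpaces_alt
  rw [PySem.List.foldl_append_eq_flatMap]
  show _ = String.mk (PySem.Chars.join "%20".toList (PySem.Chars.splitOn.go [' '] (s.toList.length + 1) s.toList [] []))
  rw [go_eq_splitSp _ _ _ _ (by omega)]
  simp only [List.reverse_nil, List.nil_append]
  rw [join_splitSp]
  simp
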